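-- pv_equiv track=rewrite | github.com/dustinrubin/FiLLIP | ransomNote/ransomNoteDustin.py | checkMagazine
-- ===== SOURCE A (Python) =====
-- def loadListIntoDictonary(list):
--     dictonary = {}
--     for word in list:
--         if word in dictonary:
--             dictonary[word] += 1
--         else:
--             dictonary[word] = 1
--     return dictonary
--
-- def checkMagazine(magazine, note):
--     magazineDictonary = loadListIntoDictonary(magazine)
--     noteDictonary = loadListIntoDictonary(note)
--     for word in noteDictonary:
--         if not word in magazineDictonary:
--             return "No"
--         if noteDictonary[word] > magazineDictonary[word]:
--             return "No"
--     return "Yes"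
-- ===== SOURCE B (Python) =====
-- def checkMagazine(magazine, note):
--     return "Yes" if all(note.count(w) <= magazine.count(w) for w in note) else "No"
-- ===== Notes on version B (the rewrite author's own statement) =====
-- stated objective: simpler
-- what changed: B drops both frequency dictionaries and the per-key scan: it is a one-line per-word count comparison (all(note.count(w) <= magazine.count(w) for w in note)).
import Mathlib
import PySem

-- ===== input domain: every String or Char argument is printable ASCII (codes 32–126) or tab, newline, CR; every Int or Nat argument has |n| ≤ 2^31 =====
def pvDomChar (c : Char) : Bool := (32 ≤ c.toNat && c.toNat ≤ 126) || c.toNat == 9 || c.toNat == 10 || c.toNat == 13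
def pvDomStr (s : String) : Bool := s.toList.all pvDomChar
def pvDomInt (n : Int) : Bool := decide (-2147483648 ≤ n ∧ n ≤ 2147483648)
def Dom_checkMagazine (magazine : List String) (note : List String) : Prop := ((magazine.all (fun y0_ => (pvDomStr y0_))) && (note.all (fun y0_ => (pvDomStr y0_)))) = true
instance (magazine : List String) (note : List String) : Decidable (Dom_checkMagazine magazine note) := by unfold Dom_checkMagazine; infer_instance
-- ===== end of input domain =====

-- B replaces A's two frequency dictionaries and per-key scan by a direct per-word
-- count comparison (objective: simpler).

-- ===== PORT A =====
def loadListIntoDictonary (list : List String) : PySem.Dict String Int :=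
  list.foldl (fun dictonary word =>
    if dictonary.contains word then dictonary.insert word (dictonary.getD word 0 + 1)
    else dictonary.insert word 1) PySem.Dict.empty

-- the 'for word in noteDictonary' loop with its early returns
def checkMagazineLoop (magD noteD : PySem.Dict String Int) : List String → String
  | [] => "Yes"
  | word :: rest =>
      if !(magD.contains word) then "No"
      else if noteD.getD word 0 > magD.getD word 0 then "No"   -- noteDictonary[word]: word is a key, so getD is exact
      else checkMagazineLoop magD noteD rest

def checkMagazine (magazine : List String) (note : List String) : String :=
  let magazineDictonary := loadListIntoDictonary magazine
  let noteDictonary := loadListIntoDictonary note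
  checkMagazineLoop magazineDictonary noteDictonary noteDictonary.keys

-- ===== PORT B =====
def checkMagazine_alt (magazine : List String) (note : List String) : String :=
  if note.all (fun w => note.count w ≤ magazine.count w) then "Yes" else "No"

-- ===== PRECONDITION & SPEC =====
def Spec_checkMagazine (magazine : List String) (note : List String) (out : String) : Prop := out = checkMagazine_alt magazine note
instance (magazine : List String) (note : List String) (out : String) : Decidable (Spec_checkMagazine magazine note out) := by unfold Spec_checkMagazine; infer_instance

-- ===== CLAIM (what is proved, stated in full; the proofs are below) =====
def Claim_equal_checkMagazine : Prop := ∀ (magazine : List String) (note : List String), Dom_checkMagazine magazine note → Spec_checkMagazine magazine note (checkMagazine magazine note)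

-- ===== LEMMAS AND PROOFS =====

-- A's hand-rolled frequency dictionary is Counter
lemma load_eq_counter (l : List String) :
    loadListIntoDictonary l = PySem.Dict.counter l := by
  unfold loadListIntoDictonary
  rw [show (fun (d : PySem.Dict String Int) word =>
        if d.contains word then d.insert word (d.getD word 0 + 1)
        else d.insert word 1)
      = (fun (d : PySem.Dict String Int) x => d.insert x (d.getD x 0 + 1)) from ?_]
  · exact PySem.Dict.foldl_insert_getD_add_one_eq_counter l
  · funext d w
    by_cases h : d.contains w
    · simp [h]
    · have h0 : d.getD w 0 = 0 := PySem.Dict.getD_of_not_contains d 0 (by simpa using h)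
      simp [h, h0]

-- the scan returns "Yes" iff every key passes both tests
lemma checkMagazineLoop_eq_all (magD noteD : PySem.Dict String Int) (ks : List String) :
    checkMagazineLoop magD noteD ks =
      if ks.all (fun w => magD.contains w && decide (noteD.getD w 0 ≤ magD.getD w 0))
      then "Yes" else "No" := by
  induction ks with
  | nil => rfl
  | cons w rest ih =>
      simp only [checkMagazineLoop, ih, List.all_cons]
      by_cases h1 : magD.contains w
      · by_cases h2 : noteD.getD w 0 > magD.getD w 0
        · simp [h1, h2, not_le.mpr h2]
        · simp [h1, h2, not_lt.mp h2]
      · simp [h1]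

-- for a word of the note, "in magazine and count ≤ count" collapses to "count ≤ count"
lemma mem_and_count_iff (magazine note : List String) (w : String) (hw : w ∈ note) :
    (magazine.contains w && decide ((note.count w : Int) ≤ (magazine.count w : Int)))
      = decide (note.count w ≤ magazine.count w) := by
  by_cases hm : w ∈ magazine
  · simp [hm]
  · have h1 : 0 < note.count w := List.count_pos_iff.mpr hw
    have h2 : magazine.count w = 0 := List.count_eq_zero.mpr hm
    simp [hm, h2, Nat.not_le.mpr h1]

-- ===== VERDICT (by name: the statement is the Claim_ definition above) =====
theorem checkMagazine_spec : Claim_equal_checkMagazine := by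
  intro magazine note _
  show checkMagazine magazine note = checkMagazine_alt magazine note
  unfold checkMagazine checkMagazine_alt
  rw [load_eq_counter, load_eq_counter, checkMagazineLoop_eq_all,
      PySem.Dict.keys_counter]
  congr 1
  simp only [List.all_eq_true]
  rw [eq_iff_iff]
  constructor
  · intro h w hw
    have := h w (by simpa [PySem.Set.mem_ofList] using hw)
    rwa [PySem.Dict.contains_counter, PySem.Dict.getD_counter, PySem.Dict.getD_counter,
        mem_and_count_iff magazine note w hw] at this
  · intro h w hw
    have hw' : w ∈ note := by simpa [PySem.Set.mem_ofList] using hw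
    rw [PySem.Dict.contains_counter, PySem.Dict.getD_counter, PySem.Dict.getD_counter,
        mem_and_count_iff magazine note w hw']
    exact h w hw'
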